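-- pv_equiv track=rewrite | github.com/Impetoast/MS_AOC | 2025/Python/AOC25D08_01.py | largest_circuit_product
-- ===== SOURCE A (Python) =====
-- def largest_circuit_product(lines, k=1000):
--     # Parse coordinates from input
--     points = []
--     for line in lines:
--         line = line.strip()
--         if not line:
--             continue
--
--         x_str, y_str, z_str = line.split(",")
--         x = int(x_str)
--         y = int(y_str)
--         z = int(z_str)
--         points.append((x, y, z))
--
--     n = len(points)
--     if n < 2:
--         return 0
--
--     # Compute all pairwise squared distances and remember indices
--     pairs = []
--     for i in range(n):
--         x1, y1, z1 = points[i]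
--         for j in range(i + 1, n):
--             x2, y2, z2 = points[j]
--             dx = x1 - x2
--             dy = y1 - y2
--             dz = z1 - z2
--             d2 = dx * dx + dy * dy + dz * dz
--             # Sorting by (d2, i, j) reproduces the deterministic order
--             pairs.append((d2, i, j))
--
--     pairs.sort(key=lambda t: (t[0], t[1], t[2]))
--
--     max_pairs = n * (n - 1) // 2
--     if k > max_pairs:
--         k = max_pairs
--     pairs = pairs[:k]
--
--     # Union-Find (Disjoint Set Union) to build circuits
--     parent = list(range(n))
--     size = [1] * n
--
--     def find(x):
--         while parent[x] != x:
--             x = parent[x]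
--         return x
--
--     for _, i, j in pairs:
--         ri = find(i)
--         rj = find(j)
--
--         if ri == rj:
--             continue
--
--         # Union by size: attach smaller tree under larger
--         if size[ri] < size[rj]:
--             ri, rj = rj, ri
--
--         parent[rj] = ri
--         size[ri] += size[rj]
--
--     # Collect component sizes (roots only)
--     components = []
--     for i in range(n):
--         if parent[i] == i:
--             components.append(size[i])
--
--     components.sort(reverse=True)
--
--     if len(components) < 3:
--         raise ValueError("Expected at least three circuits")
--
--     return components[0] * components[1] * components[2]
-- ===== SOURCE B (Python) =====
-- def largest_circuit_product(lines, k=1000):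
--     # Parse coordinates from input (identical to the original parser)
--     points = []
--     for line in lines:
--         line = line.strip()
--         if not line:
--             continue
--         x_str, y_str, z_str = line.split(",")
--         points.append((int(x_str), int(y_str), int(z_str)))
--
--     n = len(points)
--     if n < 2:
--         return 0
--
--     # Same deterministic edge choice: all pairs, sorted by (d2, i, j), first k
--     pairs = []
--     for i in range(n):
--         x1, y1, z1 = points[i]
--         for j in range(i + 1, n):
--             x2, y2, z2 = points[j]
--             dx, dy, dz = x1 - x2, y1 - y2, z1 - z2
--             pairs.append((dx * dx + dy * dy + dz * dz, i, j))
--     pairs.sort(key=lambda t: (t[0], t[1], t[2]))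
--
--     max_pairs = n * (n - 1) // 2
--     if k > max_pairs:
--         k = max_pairs
--
--     # Quick-find: a flat label array instead of a parent forest.  Merging an
--     # edge rewrites every occurrence of the smaller component's label, so a
--     # vertex's component id is read off directly, with no find loop.
--     labels = list(range(n))
--     size = [1] * n
--     for _, i, j in pairs[:k]:
--         li, lj = labels[i], labels[j]
--         if li == lj:
--             continue
--         if size[li] < size[lj]:
--             li, lj = lj, li
--         labels = [li if l == lj else l for l in labels]
--         size[li] += size[lj]
--
--     components = sorted((size[i] for i in range(n) if labels[i] == i), reverse=True)
--     if len(components) < 3: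
--         raise ValueError("Expected at least three circuits")
--     return components[0] * components[1] * components[2]
-- ===== Notes on version B (the rewrite author's own statement) =====
-- stated objective: alternative
-- what changed: Replaces the parent-forest union-find (per-edge pointer-chasing find, union by size) with an eager quick-find structure: a flat label array where merging an edge rewrites every occurrence of the smaller component's label, so component ids are read directly with no find loop; parsing, pair generation, the (d2,i,j) sort and the k clamp/slice are kept identical.
import Mathlib
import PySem

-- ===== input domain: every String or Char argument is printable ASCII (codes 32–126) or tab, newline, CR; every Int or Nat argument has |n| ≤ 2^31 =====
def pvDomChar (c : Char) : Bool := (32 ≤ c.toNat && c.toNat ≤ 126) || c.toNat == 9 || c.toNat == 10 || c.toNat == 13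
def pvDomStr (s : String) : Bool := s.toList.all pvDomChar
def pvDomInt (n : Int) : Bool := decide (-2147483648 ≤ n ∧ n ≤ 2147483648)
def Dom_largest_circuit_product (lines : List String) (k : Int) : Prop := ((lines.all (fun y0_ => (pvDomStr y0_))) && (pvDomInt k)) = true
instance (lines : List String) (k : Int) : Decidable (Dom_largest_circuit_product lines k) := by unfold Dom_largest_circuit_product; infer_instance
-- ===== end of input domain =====

-- B replaces A's parent-forest union-find (pointer-chasing `find`, union by size) by an eager
-- quick-find label array (merging an edge rewrites the smaller component's label everywhere);
-- parsing, pair generation, the (d2,i,j) sort and the k clamp/slice are identical, so they are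
-- shared helpers below. Same cost class (the O(n^2 log n) sort dominates both).

-- ===== PORT A =====
-- shared: the parsing loop (both Pythons are verbatim identical here); a malformed line
-- (not three comma-separated ints) raises ValueError in Python -> none, excluded by Pre_.
def pvParse (lines : List String) : Option (List (Int × Int × Int)) :=
  lines.foldl (fun acc line =>
    match acc with
    | none => none
    | some pts =>
      let l := PySem.Str.strip line
      if l = "" then some pts
      else
        match PySem.Str.split? l "," with
        | some [xs, ys, zs] =>
          match PySem.Int.ofStr? xs, PySem.Int.ofStr? ys, PySem.Int.ofStr? zs with
          | some x, some y, some z => some (pts ++ [(x, y, z)])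
          | _, _, _ => none
        | _ => none) (some [])

-- shared: the nested pair-generation loops (identical in both Pythons)
def pvPairs (points : List (Int × Int × Int)) : List (Int × Int × Int) :=
  let n : Int := (points.length : Int)
  (PySem.List.pyRange 0 n 1).foldl (fun pairs i =>
    let p1 := PySem.List.pyGetD points i (0, 0, 0)
    (PySem.List.pyRange (i + 1) n 1).foldl (fun pairs j =>
      let p2 := PySem.List.pyGetD points j (0, 0, 0)
      let dx := p1.1 - p2.1
      let dy := p1.2.1 - p2.2.1
      let dz := p1.2.2 - p2.2.2
      pairs ++ [(dx * dx + dy * dy + dz * dz, i, j)]) pairs) []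

-- shared: sort by the tuple key (d2, i, j) (lexicographic, as Python tuples compare),
-- clamp k to n*(n-1)//2 and take pairs[:k] (identical in both Pythons)
def pvEdges (points : List (Int × Int × Int)) (k : Int) : List (Int × Int × Int) :=
  let n : Int := (points.length : Int)
  let pairs := PySem.List.sorted (pvPairs points) (fun t => toLex (t.1, toLex (t.2.1, t.2.2))) false
  let maxPairs := PySem.Int.floordiv (n * (n - 1)) 2
  let kk := if k > maxPairs then maxPairs else k
  PySem.List.slice pairs none (some kk)

-- shared: sort the component sizes descending and multiply the top three (identical in both
-- Pythons); with fewer than three components Python raises ValueError -> junk 0, excluded by Pre_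
def pvFinish (comps : List Int) : Int :=
  match PySem.List.sorted comps (fun x => x) true with
  | c0 :: c1 :: c2 :: _ => c0 * c1 * c2
  | _ => 0

-- A's find: while parent[x] != x: x = parent[x].  Fueled with len(parent), which always
-- suffices (proved via the chain-length bound in the invariant below); indices are always
-- in range here, so the pyGetD default is never read.
def pvFind (fuel : Nat) (parent : List Int) (x : Int) : Int :=
  match fuel with
  | 0 => x
  | f + 1 =>
    if PySem.List.pyGetD parent x 0 = x then x
    else pvFind f parent (PySem.List.pyGetD parent x 0)

-- A's per-edge union step on the state (parent, size)
def pvStepA (st : List Int × List Int) (e : Int × Int × Int) : List Int × List Int :=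
  let parent := st.1
  let size := st.2
  let ri := pvFind parent.length parent e.2.1
  let rj := pvFind parent.length parent e.2.2
  if ri = rj then (parent, size)
  else
    let rij := if PySem.List.pyGetD size ri 0 < PySem.List.pyGetD size rj 0 then (rj, ri) else (ri, rj)
    (PySem.List.pySetD parent rij.2 rij.1,
     PySem.List.pySetD size rij.1 (PySem.List.pyGetD size rij.1 0 + PySem.List.pyGetD size rij.2 0))

def largest_circuit_product (lines : List String) (k : Int) : Int :=
  match pvParse lines with
  | none => 0
  | some points =>
    let n : Int := (points.length : Int)
    if n < 2 then 0
    else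
      let st := (pvEdges points k).foldl pvStepA
        (PySem.List.pyRange 0 n 1, List.replicate points.length 1)
      let comps := (PySem.List.pyRange 0 n 1).foldl
        (fun acc i => if PySem.List.pyGetD st.1 i 0 = i then acc ++ [PySem.List.pyGetD st.2 i 0] else acc) []
      pvFinish comps

-- ===== PORT B =====
-- B's per-edge quick-find step on the state (labels, size): no find loop; merging rewrites
-- every occurrence of the smaller component's label in the flat label array
def pvStepB (st : List Int × List Int) (e : Int × Int × Int) : List Int × List Int :=
  let labels := st.1
  let size := st.2
  let li := PySem.List.pyGetD labels e.2.1 0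
  let lj := PySem.List.pyGetD labels e.2.2 0
  if li = lj then (labels, size)
  else
    let lij := if PySem.List.pyGetD size li 0 < PySem.List.pyGetD size lj 0 then (lj, li) else (li, lj)
    (labels.map (fun l => if l = lij.2 then lij.1 else l),
     PySem.List.pySetD size lij.1 (PySem.List.pyGetD size lij.1 0 + PySem.List.pyGetD size lij.2 0))

def largest_circuit_product_alt (lines : List String) (k : Int) : Int :=
  match pvParse lines with
  | none => 0
  | some points =>
    let n : Int := (points.length : Int)
    if n < 2 then 0
    else
      let st := (pvEdges points k).foldl pvStepB
        (PySem.List.pyRange 0 n 1, List.replicate points.length 1)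
      pvFinish (((PySem.List.pyRange 0 n 1).filter
          (fun i => PySem.List.pyGetD st.1 i 0 == i)).map (fun i => PySem.List.pyGetD st.2 i 0))

-- ===== PRECONDITION & SPEC =====
-- Independent component count used only by Pre_: adjacency matrix of the chosen edges closed
-- by Floyd–Warshall reachability, components counted by their minimal vertex (deliberately
-- neither port's union structure).
def pvAdj (n : Nat) (edges : List (Int × Int × Int)) : List (List Bool) :=
  (List.range n).map (fun i => (List.range n).map (fun j =>
    i == j || edges.any (fun e =>
      (e.2.1 == (i : Int) && e.2.2 == (j : Int)) || (e.2.1 == (j : Int) && e.2.2 == (i : Int)))))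

def pvWar (n : Nat) (m0 : List (List Bool)) : List (List Bool) :=
  (List.range n).foldl (fun m t => (List.range n).map (fun i => (List.range n).map (fun j =>
    ((m.getD i []).getD j false) || (((m.getD i []).getD t false) && ((m.getD t []).getD j false))))) m0

def pvNumComponents (points : List (Int × Int × Int)) (k : Int) : Nat :=
  let n := points.length
  let m := pvWar n (pvAdj n (pvEdges points k))
  ((List.range n).filter (fun i => (List.range i).all (fun j => !((m.getD i []).getD j false)))).length

def pvPreB (lines : List String) (k : Int) : Bool :=
  match pvParse lines with
  | none => false
  | some points => decide (points.length < 2) || decide (3 ≤ pvNumComponents points k)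

-- Pre_ holds exactly where the Python A returns normally: every nonblank line parses as three
-- comma-separated ints (else ValueError), and either fewer than two points (A returns 0) or the
-- chosen edges leave at least three connected components (else ValueError).
def Pre_largest_circuit_product (lines : List String) (k : Int) : Prop := pvPreB lines k = true
instance (lines : List String) (k : Int) : Decidable (Pre_largest_circuit_product lines k) := by
  unfold Pre_largest_circuit_product; infer_instance

def pvWitness_largest_circuit_product : List String × Int := (["0,0,0", "1,0,0", "2,0,0"], 0)

def Spec_largest_circuit_product (lines : List String) (k : Int) (out : Int) : Prop := out = largest_circuit_product_alt lines k
instance (lines : List String) (k : Int) (out : Int) : Decidable (Spec_largest_circuit_product lines k out) := by unfold Spec_largest_circuit_product; infer_instance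

-- ===== CLAIM (what is proved, stated in full; the proofs are below) =====
def Claim_equal_largest_circuit_product : Prop := ∀ (lines : List String) (k : Int), Dom_largest_circuit_product lines k → Pre_largest_circuit_product lines k → Spec_largest_circuit_product lines k (largest_circuit_product lines k)

-- ===== LEMMAS AND PROOFS =====

-- `pvChain p v d r`: following parent pointers from v reaches the root r in d steps.
inductive pvChain (p : List Int) : Int → Nat → Int → Prop where
  | root (v : Int) (h0 : 0 ≤ v) (h1 : v < (p.length : Int))
      (hfix : PySem.List.pyGetD p v 0 = v) : pvChain p v 0 v
  | step (v : Int) (d : Nat) (r : Int) (h0 : 0 ≤ v) (h1 : v < (p.length : Int))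
      (hne : PySem.List.pyGetD p v 0 ≠ v) (h : pvChain p (PySem.List.pyGetD p v 0) d r) :
      pvChain p v (d + 1) r

theorem pvChain_fix {p : List Int} {v : Int} {d : Nat} {r : Int} (h : pvChain p v d r) :
    0 ≤ r ∧ r < (p.length : Int) ∧ PySem.List.pyGetD p r 0 = r := by
  induction h with
  | root v h0 h1 hfix => exact ⟨h0, h1, hfix⟩
  | step v d r h0 h1 hne h ih => exact ih

theorem pvChain_unique {p : List Int} {v : Int} {d e : Nat} {r s : Int}
    (h1 : pvChain p v d r) (h2 : pvChain p v e s) : r = s := by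
  induction h1 generalizing e with
  | root v h0 hl hfix =>
    cases h2 with
    | root => rfl
    | step _ _ _ _ _ hne _ => exact absurd hfix hne
  | step v d r h0 hl hne h ih =>
    cases h2 with
    | root _ _ _ hfix => exact absurd hfix hne
    | step _ _ _ _ _ _ h' => exact ih h'

theorem pvFind_of_chain {p : List Int} {v : Int} {d : Nat} {r : Int}
    (h : pvChain p v d r) : ∀ f : Nat, d < f → pvFind f p v = r := by
  induction h with
  | root v h0 h1 hfix =>
    intro f hf
    match f, hf with
    | f + 1, _ => simp [pvFind, hfix]
  | step v d r h0 h1 hne h ih =>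
    intro f hf
    match f, hf with
    | f + 1, hf => simp only [pvFind, if_neg hne]; exact ih f (by omega)

-- pyGetD at an in-range Int index: update, map, membership, pyRange
theorem pvGetD_pySetD_int (xs : List Int) (b w m : Int) (h0 : 0 ≤ b)
    (h1 : b < (xs.length : Int)) (hm : 0 ≤ m) :
    PySem.List.pyGetD (PySem.List.pySetD xs b w) m 0 =
      if m = b then w else PySem.List.pyGetD xs m 0 := by
  have hb : b = (b.toNat : Int) := by omega
  have hm' : m = (m.toNat : Int) := by omega
  rw [hb, hm', PySem.List.pyGetD_pySetD_natCast xs b.toNat m.toNat w 0 (by omega)]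
  by_cases h : m.toNat = b.toNat <;> simp [h] <;> omega

theorem pvGetD_map_int (f : Int → Int) (xs : List Int) (v : Int)
    (h0 : 0 ≤ v) (h1 : v < (xs.length : Int)) :
    PySem.List.pyGetD (xs.map f) v 0 = f (PySem.List.pyGetD xs v 0) := by
  rw [PySem.List.pyGetD_eq_getElem _ _ h0 (by simpa using h1),
      PySem.List.pyGetD_eq_getElem _ _ h0 h1, List.getElem_map]

theorem pvGetD_mem_int (xs : List Int) (v : Int) (h0 : 0 ≤ v) (h1 : v < (xs.length : Int)) :
    PySem.List.pyGetD xs v 0 ∈ xs := by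
  rw [PySem.List.pyGetD_eq_getElem _ _ h0 h1]; exact List.getElem_mem _

theorem pvRange_getD (n : Nat) (v : Int) (h0 : 0 ≤ v) (h1 : v < (n : Int)) :
    PySem.List.pyGetD (PySem.List.pyRange 0 (n : Int) 1) v 0 = v := by
  have hlen : (PySem.List.pyRange 0 (n : Int) 1).length = n := by
    rw [PySem.List.length_pyRange_one]; omega
  rw [PySem.List.pyGetD_eq_getElem _ _ h0 (by rw [hlen]; exact h1),
    PySem.List.getElem_pyRange_one]
  omega

-- counting after the relabelling map
theorem pvCount_map_replace (a b : Int) (hab : a ≠ b) (l : List Int) :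
    (l.map (fun x => if x = b then a else x)).count a = l.count a + l.count b := by
  induction l with
  | nil => simp
  | cons x t ih =>
    by_cases h : x = b <;>
      simp [List.count_cons, h, ih, hab.symm] <;> omega

theorem pvCount_map_replace_other (a b c : Int) (hca : c ≠ a) (hcb : c ≠ b) (l : List Int) :
    (l.map (fun x => if x = b then a else x)).count c = l.count c := by
  induction l with
  | nil => simp
  | cons x t ih =>
    by_cases h : x = b <;>
      simp [List.count_cons, h, ih, hca.symm, hcb.symm]

-- updating below a root leaves chains ending elsewhere untouched,
-- and extends chains ending in b by one step to the new root a
theorem pvChain_avoid {p : List Int} {b a : Int}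
    (hb0 : 0 ≤ b) (hb1 : b < (p.length : Int)) (hbfix : PySem.List.pyGetD p b 0 = b) :
    ∀ {v : Int} {d : Nat} {r : Int}, pvChain p v d r → r ≠ b →
      pvChain (PySem.List.pySetD p b a) v d r := by
  intro v d r h
  induction h with
  | root w h0 h1 hfix =>
    intro hr
    exact pvChain.root w h0 (by rw [PySem.List.length_pySetD]; exact h1)
      (by rw [pvGetD_pySetD_int p b a w hb0 hb1 h0, if_neg hr]; exact hfix)
  | step w dd rr h0 h1 hne hch ih =>
    intro hr
    have hwb : w ≠ b := fun hh => hne (by rw [hh]; exact hbfix)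
    have hget : PySem.List.pyGetD (PySem.List.pySetD p b a) w 0 = PySem.List.pyGetD p w 0 := by
      rw [pvGetD_pySetD_int p b a w hb0 hb1 h0, if_neg hwb]
    refine pvChain.step w dd rr h0 (by rw [PySem.List.length_pySetD]; exact h1) ?_ ?_
    · rw [hget]; exact hne
    · rw [hget]; exact ih hr

theorem pvChain_extend {p : List Int} {b a : Int}
    (hb0 : 0 ≤ b) (hb1 : b < (p.length : Int)) (hbfix : PySem.List.pyGetD p b 0 = b)
    (ha0 : 0 ≤ a) (ha1 : a < (p.length : Int)) (hafix : PySem.List.pyGetD p a 0 = a)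
    (hab : a ≠ b) :
    ∀ {v : Int} {d : Nat} {r : Int}, pvChain p v d r → r = b →
      pvChain (PySem.List.pySetD p b a) v (d + 1) a := by
  intro v d r h
  induction h with
  | root w h0 h1 hfix =>
    intro hr
    subst hr
    have h1' : w < ((PySem.List.pySetD p w a).length : Int) := by
      rw [PySem.List.length_pySetD]; exact h1
    have hgb : PySem.List.pyGetD (PySem.List.pySetD p w a) w 0 = a := by
      rw [pvGetD_pySetD_int p w a w h0 h1 h0, if_pos rfl]
    have hga : PySem.List.pyGetD (PySem.List.pySetD p w a) a 0 = a := by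
      rw [pvGetD_pySetD_int p w a a h0 h1 ha0, if_neg hab]; exact hafix
    refine pvChain.step w 0 a h0 h1' (by rw [hgb]; exact hab) ?_
    rw [hgb]
    exact pvChain.root a ha0 (by rw [PySem.List.length_pySetD]; exact ha1) hga
  | step w dd rr h0 h1 hne hch ih =>
    intro hr
    have hwb : w ≠ b := fun hh => hne (by rw [hh]; exact hbfix)
    have hget : PySem.List.pyGetD (PySem.List.pySetD p b a) w 0 = PySem.List.pyGetD p w 0 := by
      rw [pvGetD_pySetD_int p b a w hb0 hb1 h0, if_neg hwb]
    refine pvChain.step w (dd + 1) a h0 (by rw [PySem.List.length_pySetD]; exact h1) ?_ ?_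
    · rw [hget]; exact hne
    · rw [hget]; exact ih hr

-- the coupling invariant: labels is the pointwise root function of parent, with the
-- chain-length bound (≤ component size = label count) that keeps the find fuel sufficient
def pvInv (parent labels : List Int) : Prop :=
  parent.length = labels.length ∧
  ∀ v : Int, 0 ≤ v → v < (parent.length : Int) →
    ∃ d : Nat, pvChain parent v d (PySem.List.pyGetD labels v 0) ∧
      d + 1 ≤ labels.count (PySem.List.pyGetD labels v 0)

theorem pvInv_init (n : Nat) :
    pvInv (PySem.List.pyRange 0 (n : Int) 1) (PySem.List.pyRange 0 (n : Int) 1) := by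
  have hlen : (PySem.List.pyRange 0 (n : Int) 1).length = n := by
    rw [PySem.List.length_pyRange_one]; omega
  refine ⟨rfl, fun v h0 h1 => ?_⟩
  rw [hlen] at h1
  have hg := pvRange_getD n v h0 h1
  refine ⟨0, ?_, ?_⟩
  · rw [hg]; exact pvChain.root v h0 (by rw [hlen]; exact h1) hg
  · rw [hg]
    have : v ∈ PySem.List.pyRange 0 (n : Int) 1 := by
      rw [PySem.List.mem_pyRange_one]; omega
    simpa using List.one_le_count_iff.mpr this

theorem pvInv_step (parent labels size : List Int) (e : Int × Int × Int)
    (hInv : pvInv parent labels)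
    (hi0 : 0 ≤ e.2.1) (hi1 : e.2.1 < (parent.length : Int))
    (hj0 : 0 ≤ e.2.2) (hj1 : e.2.2 < (parent.length : Int)) :
    (pvStepA (parent, size) e).2 = (pvStepB (labels, size) e).2 ∧
    pvInv (pvStepA (parent, size) e).1 (pvStepB (labels, size) e).1 ∧
    (pvStepA (parent, size) e).1.length = parent.length := by
  obtain ⟨hlen, hI⟩ := hInv
  obtain ⟨di, chi, cnti⟩ := hI e.2.1 hi0 hi1
  obtain ⟨dj, chj, cntj⟩ := hI e.2.2 hj0 hj1
  set li := PySem.List.pyGetD labels e.2.1 0 with hli_def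
  set lj := PySem.List.pyGetD labels e.2.2 0 with hlj_def
  have hfi : pvFind parent.length parent e.2.1 = li := by
    refine pvFind_of_chain chi parent.length ?_
    have := List.count_le_length (l := labels) (a := li)
    omega
  have hfj : pvFind parent.length parent e.2.2 = lj := by
    refine pvFind_of_chain chj parent.length ?_
    have := List.count_le_length (l := labels) (a := lj)
    omega
  have hA : pvStepA (parent, size) e =
      (if li = lj then (parent, size) else
        ((fun lij => (PySem.List.pySetD parent lij.2 lij.1,
          PySem.List.pySetD size lij.1
            (PySem.List.pyGetD size lij.1 0 + PySem.List.pyGetD size lij.2 0)))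
          (if PySem.List.pyGetD size li 0 < PySem.List.pyGetD size lj 0
            then (lj, li) else (li, lj)))) := by
    simp only [pvStepA, hfi, hfj]
  have hB : pvStepB (labels, size) e =
      (if li = lj then (labels, size) else
        ((fun lij => (labels.map (fun l => if l = lij.2 then lij.1 else l),
          PySem.List.pySetD size lij.1
            (PySem.List.pyGetD size lij.1 0 + PySem.List.pyGetD size lij.2 0)))
          (if PySem.List.pyGetD size li 0 < PySem.List.pyGetD size lj 0
            then (lj, li) else (li, lj)))) := rfl
  by_cases hll : li = lj
  · rw [hA, hB, if_pos hll, if_pos hll]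
    exact ⟨rfl, ⟨hlen, hI⟩, rfl⟩
  · rw [hA, hB, if_neg hll, if_neg hll]
    set lij := (if PySem.List.pyGetD size li 0 < PySem.List.pyGetD size lj 0
      then (lj, li) else (li, lj)) with hlij_def
    set a := lij.1 with ha_def
    set b := lij.2 with hb_def
    have habs : (a = li ∧ b = lj) ∨ (a = lj ∧ b = li) := by
      rw [ha_def, hb_def, hlij_def]
      split_ifs with h
      · right; exact ⟨rfl, rfl⟩
      · left; exact ⟨rfl, rfl⟩
    obtain ⟨hli0, hli1, hlifix⟩ := pvChain_fix chi
    obtain ⟨hlj0, hlj1, hljfix⟩ := pvChain_fix chj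
    have hab : a ≠ b := by
      rcases habs with ⟨h1, h2⟩ | ⟨h1, h2⟩ <;> rw [h1, h2]
      · exact hll
      · exact fun hx => hll hx.symm
    have ha0 : 0 ≤ a := by rcases habs with ⟨h1, _⟩ | ⟨h1, _⟩ <;> rw [h1] <;> assumption
    have ha1 : a < (parent.length : Int) := by
      rcases habs with ⟨h1, _⟩ | ⟨h1, _⟩ <;> rw [h1] <;> assumption
    have hafix : PySem.List.pyGetD parent a 0 = a := by
      rcases habs with ⟨h1, _⟩ | ⟨h1, _⟩ <;> rw [h1] <;> assumption
    have hb0 : 0 ≤ b := by rcases habs with ⟨_, h2⟩ | ⟨_, h2⟩ <;> rw [h2] <;> assumption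
    have hb1 : b < (parent.length : Int) := by
      rcases habs with ⟨_, h2⟩ | ⟨_, h2⟩ <;> rw [h2] <;> assumption
    have hbfix : PySem.List.pyGetD parent b 0 = b := by
      rcases habs with ⟨_, h2⟩ | ⟨_, h2⟩ <;> rw [h2] <;> assumption
    have hmi : PySem.List.pyGetD labels e.2.1 0 ∈ labels :=
      pvGetD_mem_int labels _ hi0 (by rw [← hlen]; exact hi1)
    have hmj : PySem.List.pyGetD labels e.2.2 0 ∈ labels :=
      pvGetD_mem_int labels _ hj0 (by rw [← hlen]; exact hj1)
    have hmema : a ∈ labels := by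
      rcases habs with ⟨h1, _⟩ | ⟨h1, _⟩ <;> rw [h1]
      · exact hmi
      · exact hmj
    refine ⟨rfl, ⟨?_, ?_⟩, by simp [PySem.List.length_pySetD]⟩
    · simp [PySem.List.length_pySetD, hlen]
    · intro v h0 h1
      rw [PySem.List.length_pySetD] at h1
      obtain ⟨d, ch, cnt⟩ := hI v h0 h1
      set lv := PySem.List.pyGetD labels v 0 with hlv_def
      have hmap : PySem.List.pyGetD
          (labels.map (fun l => if l = b then a else l)) v 0 =
          if lv = b then a else lv := by
        rw [pvGetD_map_int _ labels v h0 (by rw [← hlen]; exact h1)]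
      by_cases hvb : lv = b
      · rw [hmap, if_pos hvb]
        refine ⟨d + 1, pvChain_extend hb0 hb1 hbfix ha0 ha1 hafix hab ch hvb, ?_⟩
        rw [pvCount_map_replace a b hab]
        have hca : 1 ≤ labels.count a := List.one_le_count_iff.mpr hmema
        rw [hvb] at cnt
        omega
      · rw [hmap, if_neg hvb]
        refine ⟨d, pvChain_avoid hb0 hb1 hbfix ch hvb, ?_⟩
        by_cases hva : lv = a
        · rw [hva, pvCount_map_replace a b hab]
          rw [hva] at cnt
          omega
        · rw [pvCount_map_replace_other a b lv hva hvb]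
          exact cnt

theorem pvInv_fold (edges : List (Int × Int × Int)) :
    ∀ (parent labels size : List Int), pvInv parent labels →
    (∀ e ∈ edges, 0 ≤ e.2.1 ∧ e.2.1 < (parent.length : Int) ∧
                  0 ≤ e.2.2 ∧ e.2.2 < (parent.length : Int)) →
    (edges.foldl pvStepA (parent, size)).2 = (edges.foldl pvStepB (labels, size)).2 ∧
    pvInv (edges.foldl pvStepA (parent, size)).1 (edges.foldl pvStepB (labels, size)).1 ∧
    (edges.foldl pvStepA (parent, size)).1.length = parent.length := by
  induction edges with
  | nil => intro parent labels size hInv hb; exact ⟨rfl, hInv, rfl⟩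
  | cons e t ih =>
    intro parent labels size hInv hb
    obtain ⟨he, ht⟩ := List.forall_mem_cons.mp hb
    obtain ⟨hs, hInv', hlen'⟩ :=
      pvInv_step parent labels size e hInv he.1 he.2.1 he.2.2.1 he.2.2.2
    have hA1 : List.foldl pvStepA (pvStepA (parent, size) e) t =
        List.foldl pvStepA ((pvStepA (parent, size) e).1, (pvStepA (parent, size) e).2) t := by
      rw [Prod.mk.eta]
    have hB1 : List.foldl pvStepB (pvStepB (labels, size) e) t =
        List.foldl pvStepB ((pvStepB (labels, size) e).1, (pvStepB (labels, size) e).2) t := by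
      rw [Prod.mk.eta]
    have := ih (pvStepA (parent, size) e).1 (pvStepB (labels, size) e).1
      (pvStepA (parent, size) e).2 hInv'
      (by intro x hx; rw [hlen']; exact ht x hx)
    simp only [List.foldl_cons, hA1, hB1, hs] at *
    exact ⟨this.1, this.2.1, by rw [this.2.2, hlen']⟩

-- every chosen edge is a pair of indices into points
theorem pvPairs_bound (points : List (Int × Int × Int)) :
    ∀ e ∈ pvPairs points, 0 ≤ e.2.1 ∧ e.2.1 < (points.length : Int) ∧
                          0 ≤ e.2.2 ∧ e.2.2 < (points.length : Int) := by
  intro e he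
  unfold pvPairs at he
  simp only [PySem.List.foldl_append_singleton_eq_map,
    PySem.List.foldl_append_eq_flatMap, List.nil_append, List.mem_flatMap,
    List.mem_map] at he
  obtain ⟨i, hi, j, hj, rfl⟩ := he
  rw [PySem.List.mem_pyRange_one] at hi hj
  simp only
  omega

theorem pvEdges_bound (points : List (Int × Int × Int)) (k : Int) :
    ∀ e ∈ pvEdges points k, 0 ≤ e.2.1 ∧ e.2.1 < (points.length : Int) ∧
                            0 ≤ e.2.2 ∧ e.2.2 < (points.length : Int) := by
  intro e he
  refine pvPairs_bound points e ?_
  unfold pvEdges at he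
  have := PySem.List.mem_of_mem_slice _ _ _ he
  rw [PySem.List.mem_sorted] at this
  exact this

-- the two ports agree on every input (on the inputs excluded by Pre_
-- both ports return the same junk value 0, so no hypothesis is needed)
theorem pvPorts_eq (lines : List String) (k : Int) :
    largest_circuit_product lines k = largest_circuit_product_alt lines k := by
  unfold largest_circuit_product largest_circuit_product_alt
  cases hp : pvParse lines with
  | none => rfl
  | some points =>
    by_cases hn : (points.length : Int) < 2
    · simp [hn]
    · simp only [if_neg hn]
      set n := points.length with hn_def
      set stA := (pvEdges points k).foldl pvStepA
        (PySem.List.pyRange 0 (n : Int) 1, List.replicate n 1) with hstA_def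
      set stB := (pvEdges points k).foldl pvStepB
        (PySem.List.pyRange 0 (n : Int) 1, List.replicate n 1) with hstB_def
      have hlen0 : (PySem.List.pyRange 0 (n : Int) 1).length = n := by
        rw [PySem.List.length_pyRange_one]; omega
      obtain ⟨hs, hInv', hlenA⟩ := pvInv_fold (pvEdges points k)
        (PySem.List.pyRange 0 (n : Int) 1) (PySem.List.pyRange 0 (n : Int) 1)
        (List.replicate n 1) (pvInv_init n)
        (by intro x hx; rw [hlen0]; exact pvEdges_bound points k x hx)
      rw [← hstA_def] at hs hInv' hlenA
      rw [← hstB_def] at hs hInv'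
      rw [hlen0] at hlenA
      have hiff : ∀ i : Int, 0 ≤ i → i < (n : Int) →
          (PySem.List.pyGetD stA.1 i 0 = i ↔ PySem.List.pyGetD stB.1 i 0 = i) := by
        intro i h0 h1
        obtain ⟨d, ch, _⟩ := hInv'.2 i h0 (by rw [hlenA]; exact h1)
        constructor
        · intro hfixA
          exact pvChain_unique ch
            (pvChain.root i h0 (by rw [hlenA]; exact h1) hfixA)
        · intro hfixB
          rw [hfixB] at ch
          exact (pvChain_fix ch).2.2
      have hcond : ∀ i ∈ PySem.List.pyRange 0 (n : Int) 1,
          (decide (PySem.List.pyGetD stA.1 i 0 = i)) =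
          (PySem.List.pyGetD stB.1 i 0 == i) := by
        intro i hi
        rw [PySem.List.mem_pyRange_one] at hi
        have hiff' := hiff i hi.1 hi.2
        by_cases h : PySem.List.pyGetD stB.1 i 0 = i
        · have hA := hiff'.mpr h
          simp [hA, h]
        · have hA : ¬ PySem.List.pyGetD stA.1 i 0 = i := fun hh => h (hiff'.mp hh)
          simp [hA, h]
      have hfoldA : (PySem.List.pyRange 0 (n : Int) 1).foldl
          (fun acc i => if PySem.List.pyGetD stA.1 i 0 = i
            then acc ++ [PySem.List.pyGetD stA.2 i 0] else acc) [] =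
          ((PySem.List.pyRange 0 (n : Int) 1).filter
            (fun i => decide (PySem.List.pyGetD stA.1 i 0 = i))).map
            (fun i => PySem.List.pyGetD stA.2 i 0) := by
        have hfold := PySem.List.foldl_append_if
          (fun i => decide (PySem.List.pyGetD stA.1 i 0 = i))
          (fun i => PySem.List.pyGetD stA.2 i 0) (PySem.List.pyRange 0 (n : Int) 1) []
        simp only [decide_eq_true_eq, List.nil_append] at hfold
        exact hfold
      rw [hfoldA, List.filter_congr hcond, hs]

-- ===== VERDICT (by name: the statement is the Claim_ definition above) =====
theorem largest_circuit_product_spec : Claim_equal_largest_circuit_product := by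
  intro lines k _ _
  unfold Spec_largest_circuit_product
  exact pvPorts_eq lines k
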